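-- pv_equiv track=rewrite | github.com/kkabaruhin/training-projects | Python/65. Valid Number/Solution.py | decNum
-- ===== SOURCE A (Python) =====
-- def decNum(s: str) -> int:
--     if (len(s) == 0 or (len(s) == 1 and (s[0] == '-' or s[0] == '+' or s[0] == '.'))): return 0
--     i = 0
--     if (s[i] == '-' or s[i] == '+'): i += 1
--     while (i < len(s) and s[i] >= '0' and s[i] <= '9'): i += 1
--     wasADot = False
--     if (i < len(s) and s[i] == '.'):
--         i += 1
--         wasADot = True
--     while (i < len(s) and s[i] >= '0' and s[i] <= '9'): i += 1
--     if (wasADot):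
--         return i
--     else:
--         return 0
-- ===== SOURCE B (Python) =====
-- def decNum(s: str) -> int:
--     if s == '.':
--         return 0
--     t = s[1:] if s[:1] in ('+', '-') else s
--     d1 = len(t) - len(t.lstrip('0123456789'))
--     if t[d1:d1 + 1] != '.':
--         return 0
--     frac = t[d1 + 1:]
--     d2 = len(frac) - len(frac.lstrip('0123456789'))
--     return (len(s) - len(t)) + d1 + 1 + d2
-- ===== Notes on version B (the rewrite author's own statement) =====
-- stated objective: simpler
-- what changed: A's manual index state machine (two while loops stepping i char by char) is replaced by loop-free slice-and-lstrip arithmetic: strip an optional sign slice, measure the integer-digit prefix as the length drop of lstrip over the digit characters, test the single-char slice for the dot, and measure the fraction digits the same way.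
import Mathlib
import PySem

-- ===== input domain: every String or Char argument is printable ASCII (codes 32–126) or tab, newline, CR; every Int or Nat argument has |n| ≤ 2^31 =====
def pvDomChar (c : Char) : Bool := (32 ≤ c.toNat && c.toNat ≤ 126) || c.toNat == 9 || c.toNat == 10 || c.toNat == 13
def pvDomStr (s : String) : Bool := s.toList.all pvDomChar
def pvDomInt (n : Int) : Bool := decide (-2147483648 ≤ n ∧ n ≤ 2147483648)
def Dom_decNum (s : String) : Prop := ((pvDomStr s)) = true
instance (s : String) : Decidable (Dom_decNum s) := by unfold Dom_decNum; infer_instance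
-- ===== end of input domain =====

-- B replaces A's index-stepping while loops with loop-free slice/lstrip length arithmetic (objective: simpler).

-- ===== PORT A =====
-- A's 'while (i < len(s) and s[i] >= '0' and s[i] <= '9'): i += 1' (both loops have this shape);
-- s[i] is always read in range, ported as getD.
def whileDigits (cs : List Char) (i : Nat) : Nat :=
  if h : i < cs.length ∧ ('0' ≤ cs.getD i ' ' ∧ cs.getD i ' ' ≤ '9') then
    whileDigits cs (i + 1)
  else i
termination_by cs.length - i
decreasing_by omega

def decNum (s : String) : Int :=
  let cs := s.toList
  if cs.length = 0 ∨ (cs.length = 1 ∧ (cs.getD 0 ' ' = '-' ∨ cs.getD 0 ' ' = '+' ∨ cs.getD 0 ' ' = '.')) then 0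
  else
    let i1 : Nat := if cs.getD 0 ' ' = '-' ∨ cs.getD 0 ' ' = '+' then 1 else 0
    let i2 := whileDigits cs i1
    if i2 < cs.length ∧ cs.getD i2 ' ' = '.' then
      -- wasADot = True: second digit loop, then 'return i'
      ((whileDigits cs (i2 + 1) : Nat) : Int)
    else
      -- wasADot = False: the second loop is a no-op (the first already stopped at a non-digit); 'return 0'
      0

-- ===== PORT B =====
-- Source B's slices s[:1], s[1:], t[d1:d1+1], t[d1+1:] are take/drop; t.lstrip('0123456789') is
-- dropWhile of the digit test (exact: lstrip removes exactly the longest prefix of those chars).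
def decNum_alt (s : String) : Int :=
  let cs := s.toList
  if cs = ['.'] then 0
  else
    let t := if cs.take 1 = ['+'] ∨ cs.take 1 = ['-'] then cs.drop 1 else cs
    let d1 := t.length - (t.dropWhile (fun c => decide ('0' ≤ c ∧ c ≤ '9'))).length
    if (t.drop d1).take 1 ≠ ['.'] then 0
    else
      let frac := t.drop (d1 + 1)
      let d2 := frac.length - (frac.dropWhile (fun c => decide ('0' ≤ c ∧ c ≤ '9'))).length
      (((cs.length - t.length) + d1 + 1 + d2 : Nat) : Int)

-- ===== PRECONDITION & SPEC =====
def Spec_decNum (s : String) (out : Int) : Prop := out = decNum_alt s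
instance (s : String) (out : Int) : Decidable (Spec_decNum s out) := by unfold Spec_decNum; infer_instance

-- ===== CLAIM (what is proved, stated in full; the proofs are below) =====
def Claim_equal_decNum : Prop := ∀ (s : String), Dom_decNum s → Spec_decNum s (decNum s)

-- ===== LEMMAS AND PROOFS =====

-- A's digit loop consumes exactly the digit prefix of the remaining suffix
theorem whileDigits_eq (cs : List Char) (i : Nat) :
    whileDigits cs i = i + ((cs.drop i).takeWhile (fun c => decide ('0' ≤ c ∧ c ≤ '9'))).length := by
  have key : ∀ (n j : Nat), cs.length - j ≤ n →
      whileDigits cs j = j + ((cs.drop j).takeWhile (fun c => decide ('0' ≤ c ∧ c ≤ '9'))).length := by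
    intro n
    induction n with
    | zero =>
      intro j hj
      rw [whileDigits, List.drop_of_length_le (by omega)]
      simp
      omega
    | succ n ih =>
      intro j hj
      rw [whileDigits]
      by_cases h : j < cs.length ∧ ('0' ≤ cs.getD j ' ' ∧ cs.getD j ' ' ≤ '9')
      · rw [dif_pos h, ih (j + 1) (by omega),
          List.drop_eq_getElem_cons h.1, List.takeWhile_cons_of_pos]
        · simp; omega
        · have := h.2
          rw [List.getD_eq_getElem _ _ h.1] at this
          simpa using this
      · rw [dif_neg h]
        by_cases hl : j < cs.length
        · rw [List.drop_eq_getElem_cons hl, List.takeWhile_cons_of_neg]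
          · simp
          · have := not_and.mp h hl
            rw [List.getD_eq_getElem _ _ hl] at this
            simpa using this
        · rw [List.drop_of_length_le (by omega)]; simp
  exact key (cs.length - i) i le_rfl

-- B's 'len(t) - len(t.lstrip(digits))' is the length of the digit prefix
theorem d1_eq (u : List Char) (p : Char → Bool) :
    u.length - (u.dropWhile p).length = (u.takeWhile p).length := by
  have h := congrArg List.length (List.takeWhile_append_dropWhile (p := p) (l := u))
  simp only [List.length_append] at h
  omega

-- B's one-char-slice test equals A's bounds-checked index test
theorem dot_iff (u : List Char) (d : Nat) :
    (u.drop d).take 1 = ['.'] ↔ (d < u.length ∧ u.getD d ' ' = '.') := by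
  by_cases h : d < u.length
  · have ht : List.take 1 (List.drop d u) = [u[d]] := by
      rw [List.drop_eq_getElem_cons h, List.take_succ_cons, List.take_zero]
    rw [ht, List.getD_eq_getElem _ _ h]
    simp [h]
  · rw [List.drop_of_length_le (by omega)]
    simp
    omega

-- the common non-guard path: u is the string after the (possibly consumed) sign, k the sign offset
theorem gen (s : String) (u : List Char) (k : Nat)
    (hdrop : s.toList.drop k = u) (hlen : s.toList.length = k + u.length)
    (hguardA : ¬ (s.toList.length = 0 ∨ (s.toList.length = 1 ∧
        (s.toList.getD 0 ' ' = '-' ∨ s.toList.getD 0 ' ' = '+' ∨ s.toList.getD 0 ' ' = '.'))))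
    (hne : ¬ (s.toList = ['.']))
    (hi1 : (if s.toList.getD 0 ' ' = '-' ∨ s.toList.getD 0 ' ' = '+' then (1 : Nat) else 0) = k)
    (ht : (if s.toList.take 1 = ['+'] ∨ s.toList.take 1 = ['-'] then s.toList.drop 1 else s.toList) = u) :
    decNum s = decNum_alt s := by
  have hgetD : ∀ j : Nat, s.toList.getD (k + j) ' ' = u.getD j ' ' := by
    intro j
    rw [← hdrop]
    simp [List.getD_eq_getElem?_getD, List.getElem?_drop]
  simp only [decNum, decNum_alt]
  rw [if_neg hguardA, if_neg hne, hi1, ht, whileDigits_eq, hdrop, d1_eq]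
  set p : Char → Bool := fun c => decide ('0' ≤ c ∧ c ≤ '9') with hp
  set L : Nat := (u.takeWhile p).length with hL
  have hdd : s.toList.drop (k + L + 1) = u.drop (L + 1) := by
    rw [← hdrop, List.drop_drop]
    congr 1
  by_cases hdot : (u.drop L).take 1 = ['.']
  · have hd := (dot_iff u L).mp hdot
    have hP : k + L < s.toList.length ∧ s.toList.getD (k + L) ' ' = '.' :=
      ⟨by omega, by rw [hgetD]; exact hd.2⟩
    rw [if_pos hP, if_neg (not_not_intro hdot), whileDigits_eq, hdd, d1_eq]
    have hk : s.toList.length - u.length = k := by omega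
    rw [hk]
  · have hP : ¬ (k + L < s.toList.length ∧ s.toList.getD (k + L) ' ' = '.') := by
      intro hc
      rw [hgetD] at hc
      exact hdot ((dot_iff u L).mpr ⟨by omega, hc.2⟩)
    rw [if_neg hP, if_pos hdot]

theorem main_eq (s : String) : decNum s = decNum_alt s := by
  rcases hcs : s.toList with _ | ⟨c, rest⟩
  · simp [decNum, decNum_alt, hcs]
  · by_cases hsign : c = '+' ∨ c = '-'
    · rcases hrest : rest with _ | ⟨c2, rest2⟩
      · subst hrest
        rcases hsign with h | h <;> subst h <;> simp [decNum, decNum_alt, hcs]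
      · apply gen s rest 1
        · simp [hcs]
        · simp [hcs]
          omega
        · simp only [hcs, hrest]
          simp
        · simp [hcs, hrest]
        · rcases hsign with h | h <;> simp [hcs, h]
        · rcases hsign with h | h <;> simp [hcs, h]
    · by_cases hdot1 : c = '.' ∧ rest = []
      · obtain ⟨h1, h2⟩ := hdot1
        subst h1; subst h2
        simp [decNum, decNum_alt, hcs]
      · apply gen s (c :: rest) 0
        · simp [hcs]
        · simp [hcs]
        · simp only [hcs]
          rintro (h | ⟨hlen, hc⟩)
          · simp at h
          · have : rest = [] := by
              simpa using hlen
            rcases hc with h | h | h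
            · exact hsign (Or.inr h)
            · exact hsign (Or.inl h)
            · exact hdot1 ⟨h, this⟩
        · simp only [hcs]
          intro h
          rw [List.cons_eq_cons] at h
          exact hdot1 ⟨h.1, h.2⟩
        · simp only [hcs]
          rw [if_neg]
          simp only [List.getD_cons_zero]
          intro h
          exact hsign (h.elim (fun h => Or.inr h) (fun h => Or.inl h))
        · simp only [hcs]
          rw [if_neg]
          simp only [List.take_succ_cons, List.take_zero, List.cons_eq_cons]
          rintro (⟨h, -⟩ | ⟨h, -⟩)
          · exact hsign (Or.inl h)
          · exact hsign (Or.inr h)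

-- ===== VERDICT (by name: the statement is the Claim_ definition above) =====
theorem decNum_spec : Claim_equal_decNum := by
  intro s _
  unfold Spec_decNum
  exact main_eq s
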